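-- pv_equiv track=rewrite | github.com/MalkinK/TradingView-API | .github/scripts/level_b_review.py | strip_env_changes
-- ===== SOURCE A (Python) =====
-- def strip_env_changes(diff: str) -> str:
--     """Remove .env file diffs to avoid sending credentials to API."""
--     lines = diff.split("\n")
--     filtered = []
--     is_env_diff = False
--     for line in lines:
--         if line.startswith("diff --git") and ".env" in line:
--             is_env_diff = True
--             filtered.append(f"{line}\n[REDACTED: .env changes stripped]")
--             continue
--         if line.startswith("diff --git"):
--             is_env_diff = False
--         if not is_env_diff:
--             filtered.append(line)
--     return "\n".join(filtered)
-- ===== SOURCE B (Python) =====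
-- def strip_env_changes(diff: str) -> str:
--     """Remove .env file diffs to avoid sending credentials to API."""
--     lines = diff.split("\n")
--     # Partition into blocks: a new block starts at each 'diff --git' header;
--     # lines before the first header form the initial block.
--     blocks = []
--     cur = []
--     for line in lines:
--         if line.startswith("diff --git"):
--             blocks.append(cur)
--             cur = [line]
--         else:
--             cur.append(line)
--     blocks.append(cur)
--     out = []
--     for block in blocks:
--         if block and block[0].startswith("diff --git") and ".env" in block[0]:
--             out.append(block[0])
--             out.append("[REDACTED: .env changes stripped]")
--         else:
--             out.extend(block)
--     return "\n".join(out)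
-- ===== Notes on version B (the rewrite author's own statement) =====
-- stated objective: alternative
-- what changed: Replaces the stateful boolean-flag filter with a two-phase partition-into-blocks-then-emit decomposition: the diff is first split into per-file blocks at each 'diff --git' header, then each block is kept whole or replaced by its header plus a redaction line.
import Mathlib
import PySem

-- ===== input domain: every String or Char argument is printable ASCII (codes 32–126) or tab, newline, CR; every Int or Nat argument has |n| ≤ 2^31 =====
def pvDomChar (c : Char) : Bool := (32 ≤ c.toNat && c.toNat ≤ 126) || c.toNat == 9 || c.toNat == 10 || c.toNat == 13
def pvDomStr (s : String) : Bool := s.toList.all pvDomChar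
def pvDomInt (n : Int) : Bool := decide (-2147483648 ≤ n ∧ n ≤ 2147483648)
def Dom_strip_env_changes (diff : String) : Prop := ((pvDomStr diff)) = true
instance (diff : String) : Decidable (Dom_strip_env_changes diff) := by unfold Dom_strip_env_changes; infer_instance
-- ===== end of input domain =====

-- B replaces A's stateful boolean-flag filter by a partition-into-blocks-then-emit
-- decomposition (objective: alternative; same cost).

-- shared string literals (as char lists; all PySem string work is on List Char)
def pvHdr : List Char := "diff --git".toList
def pvEnvSub : List Char := ".env".toList
def pvRed : List Char := "[REDACTED: .env changes stripped]".toList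
def pvNl : List Char := "\n".toList

-- ===== PORT A =====
-- A's loop over lines with the mutable flag `is_env_diff`, carried as the Bool argument.
def pvLoopA : List (List Char) → Bool → List (List Char)
  | [], _ => []
  | l :: ls, env =>
    if PySem.Chars.startswith l pvHdr && PySem.Chars.isIn pvEnvSub l then
      (l ++ pvNl ++ pvRed) :: pvLoopA ls true          -- f"{line}\n[REDACTED: ...]"
    else if PySem.Chars.startswith l pvHdr then
      l :: pvLoopA ls false
    else if env then
      pvLoopA ls env
    else
      l :: pvLoopA ls env

def strip_env_changes (diff : String) : String :=
  String.ofList (PySem.Chars.join pvNl (pvLoopA (PySem.Chars.splitOn diff.toList pvNl) false))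

-- ===== PORT B =====
-- B phase 1: partition the lines into blocks, opening a new block at each header line.
def pvPart : List (List Char) → List (List Char) → List (List (List Char))
  | [], cur => [cur]
  | l :: ls, cur =>
    if PySem.Chars.startswith l pvHdr then cur :: pvPart ls [l]
    else pvPart ls (cur ++ [l])

-- B phase 2: emit a block — redacted header blocks collapse to header + redaction line.
def pvEmit (b : List (List Char)) : List (List Char) :=
  match b with
  | [] => []
  | h :: _ =>
    if PySem.Chars.startswith h pvHdr && PySem.Chars.isIn pvEnvSub h then [h, pvRed] else b

def strip_env_changes_alt (diff : String) : String :=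
  String.ofList (PySem.Chars.join pvNl
    ((pvPart (PySem.Chars.splitOn diff.toList pvNl) []).flatMap pvEmit))

-- ===== PRECONDITION & SPEC =====
def Spec_strip_env_changes (diff : String) (out : String) : Prop := out = strip_env_changes_alt diff
instance (diff : String) (out : String) : Decidable (Spec_strip_env_changes diff out) := by unfold Spec_strip_env_changes; infer_instance

-- ===== CLAIM (what is proved, stated in full; the proofs are below) =====
def Claim_equal_strip_env_changes : Prop := ∀ (diff : String), Dom_strip_env_changes diff → Spec_strip_env_changes diff (strip_env_changes diff)

-- ===== LEMMAS AND PROOFS =====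

-- A's loop, with the redacted line emitted as TWO list elements instead of one
-- element containing an embedded '\n' (joins with '\n' agree: pvJoin_loopA2).
def pvLoopA2 : List (List Char) → Bool → List (List Char)
  | [], _ => []
  | l :: ls, env =>
    if PySem.Chars.startswith l pvHdr && PySem.Chars.isIn pvEnvSub l then
      l :: pvRed :: pvLoopA2 ls true
    else if PySem.Chars.startswith l pvHdr then
      l :: pvLoopA2 ls false
    else if env then
      pvLoopA2 ls env
    else
      l :: pvLoopA2 ls env

theorem pvLoopA_nil_iff (ls : List (List Char)) (env : Bool) :
    pvLoopA ls env = [] ↔ pvLoopA2 ls env = [] := by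
  induction ls generalizing env with
  | nil => simp [pvLoopA, pvLoopA2]
  | cons l ls ih =>
    simp only [pvLoopA, pvLoopA2]
    split_ifs <;> simp [ih]

theorem pvJoin_cons_congr (x : List Char) (t₁ t₂ : List (List Char))
    (hnil : t₁ = [] ↔ t₂ = []) (hj : PySem.Chars.join pvNl t₁ = PySem.Chars.join pvNl t₂) :
    PySem.Chars.join pvNl (x :: t₁) = PySem.Chars.join pvNl (x :: t₂) := by
  cases t₁ with
  | nil => cases t₂ with
    | nil => rfl
    | cons b bs => simp at hnil
  | cons a as => cases t₂ with
    | nil => simp at hnil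
    | cons b bs =>
      rw [PySem.Chars.join_cons_cons, PySem.Chars.join_cons_cons, hj]

theorem pvJoin_merged (a b : List Char) (rest : List (List Char)) :
    PySem.Chars.join pvNl ((a ++ pvNl ++ b) :: rest) = PySem.Chars.join pvNl (a :: b :: rest) := by
  cases rest with
  | nil => rw [PySem.Chars.join_singleton, PySem.Chars.join_cons_cons, PySem.Chars.join_singleton]
  | cons r rs =>
    rw [PySem.Chars.join_cons_cons, PySem.Chars.join_cons_cons, PySem.Chars.join_cons_cons]
    simp [List.append_assoc]

theorem pvJoin_loopA2 (ls : List (List Char)) (env : Bool) :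
    PySem.Chars.join pvNl (pvLoopA ls env) = PySem.Chars.join pvNl (pvLoopA2 ls env) := by
  induction ls generalizing env with
  | nil => rfl
  | cons l ls ih =>
    simp only [pvLoopA, pvLoopA2]
    split_ifs with h1 h2 h3
    · rw [pvJoin_merged]
      exact pvJoin_cons_congr l _ _ (by simp)
        (pvJoin_cons_congr pvRed _ _ (pvLoopA_nil_iff ls true) (ih true))
    · exact pvJoin_cons_congr l _ _ (pvLoopA_nil_iff ls false) (ih false)
    · exact ih env
    · exact pvJoin_cons_congr l _ _ (pvLoopA_nil_iff ls env) (ih env)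

-- the flag A's loop would carry while B is inside block `cur`
def pvFlag (cur : List (List Char)) : Bool :=
  match cur with
  | [] => false
  | h :: _ => PySem.Chars.startswith h pvHdr && PySem.Chars.isIn pvEnvSub h

theorem pvMain (ls cur : List (List Char)) :
    (pvPart ls cur).flatMap pvEmit = pvEmit cur ++ pvLoopA2 ls (pvFlag cur) := by
  induction ls generalizing cur with
  | nil => simp [pvPart, pvLoopA2]
  | cons l ls ih =>
    simp only [pvPart, pvLoopA2]
    by_cases hh : PySem.Chars.startswith l pvHdr
    · by_cases he : PySem.Chars.isIn pvEnvSub l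
      · simp [hh, he, ih, pvEmit, pvFlag]
      · simp [hh, he, ih, pvEmit, pvFlag]
    · rw [if_neg hh, if_neg (by simp [hh]), if_neg hh, ih]
      cases cur with
      | nil => simp [pvEmit, pvFlag, hh]
      | cons h t =>
        by_cases hf : PySem.Chars.startswith h pvHdr && PySem.Chars.isIn pvEnvSub h
        · simp [pvEmit, pvFlag, hf]
        · simp [pvEmit, pvFlag, hf]

-- ===== VERDICT (by name: the statement is the Claim_ definition above) =====
theorem strip_env_changes_spec : Claim_equal_strip_env_changes := by
  intro diff _
  show _ = _
  unfold strip_env_changes strip_env_changes_alt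
  rw [pvMain, pvJoin_loopA2]
  simp [pvEmit, pvFlag]
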